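-- pv_equiv track=rewrite | github.com/0eDDarD0/Python_exercises | balanced_array.py | balanza
-- ===== SOURCE A (Python) =====
-- def sumSide(elements, start, wall):
--     '''Returns the sum of all elements of the subarray, start included, wall not included'''
--     sumatory = 0
--
--     for i in elements[start:wall]:
--         sumatory += i
--
--     return sumatory
--
-- def balanza(elements):
--     '''Returns a dict where "i" is the most balanced position of the array and "diff" is the difference between the two sides'''
--     best_index = 0
--     best_difference = -1
--
--     for i in range(1, len(elements)-1):
--         attempt = abs(sumSide(elements, 0, i) - sumSide(elements, i+1, len(elements)))
--         if(best_difference == -1 or attempt < best_difference):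
--             best_index = i
--             best_difference = attempt
--
--     return {"i": best_index, "diff": best_difference}
-- ===== SOURCE B (Python) =====
-- def balanza(elements):
--     '''Returns a dict where "i" is the most balanced position of the array and "diff" is the difference between the two sides'''
--     total = sum(elements)
--     best_index = 0
--     best_difference = -1
--     left = 0
--     for i in range(1, len(elements) - 1):
--         left += elements[i - 1]
--         attempt = abs(left - (total - left - elements[i]))
--         if best_difference == -1 or attempt < best_difference:
--             best_index = i
--             best_difference = attempt
--     return {"i": best_index, "diff": best_difference}
-- ===== Notes on version B (the rewrite author's own statement) =====
-- stated objective: faster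
-- what changed: Replaces the per-index recomputation of both side sums (sumSide slices summed inside the loop) with a single total and a running left prefix sum, so each candidate difference is computed in O(1).
import Mathlib
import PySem

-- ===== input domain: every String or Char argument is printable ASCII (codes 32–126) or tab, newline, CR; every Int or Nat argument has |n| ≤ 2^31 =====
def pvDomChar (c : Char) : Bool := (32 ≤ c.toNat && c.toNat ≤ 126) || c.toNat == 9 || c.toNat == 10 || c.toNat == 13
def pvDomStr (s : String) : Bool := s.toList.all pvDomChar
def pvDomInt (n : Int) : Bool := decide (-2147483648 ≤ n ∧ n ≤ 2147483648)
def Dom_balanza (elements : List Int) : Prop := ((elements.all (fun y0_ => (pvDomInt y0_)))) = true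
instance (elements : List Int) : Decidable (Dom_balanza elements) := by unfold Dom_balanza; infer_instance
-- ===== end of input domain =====

-- B replaces A's per-index slice-and-sum of both sides with one total plus a running left
-- prefix sum, computing each candidate difference in O(1) (objective: faster, O(n) vs O(n^2)).

-- ===== PORT A =====
-- sum of elements[start:wall], accumulated with a loop as in Python
def sumSide (elements : List Int) (start wall : Int) : Int :=
  (PySem.List.slice elements (some start) (some wall)).foldl (fun sumatory i => sumatory + i) 0

def balanza (elements : List Int) : List (String × Int) :=
  let n : Int := elements.length
  let st :=
    (PySem.List.pyRange 1 (n - 1) 1).foldl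
      (fun (s : Int × Int) i =>
        let attempt := |sumSide elements 0 i - sumSide elements (i + 1) n|
        if s.2 = -1 ∨ attempt < s.2 then (i, attempt) else s)
      (0, -1)
  [("i", st.1), ("diff", st.2)]

-- ===== PORT B =====
def balanza_alt (elements : List Int) : List (String × Int) :=
  let n : Int := elements.length
  let total := elements.foldl (fun acc x => acc + x) 0
  -- state: (best_index, best_difference, left); indexing is always in range here, so
  -- pyGetD is exact for Python's elements[i-1] / elements[i]
  let st :=
    (PySem.List.pyRange 1 (n - 1) 1).foldl
      (fun (s : Int × Int × Int) i =>
        let left := s.2.2 + PySem.List.pyGetD elements (i - 1) 0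
        let attempt := |left - (total - left - PySem.List.pyGetD elements i 0)|
        if s.2.1 = -1 ∨ attempt < s.2.1 then (i, attempt, left) else (s.1, s.2.1, left))
      (0, -1, 0)
  [("i", st.1), ("diff", st.2.1)]

-- ===== PRECONDITION & SPEC =====
def Spec_balanza (elements : List Int) (out : List (String × Int)) : Prop := out = balanza_alt elements
instance (elements : List Int) (out : List (String × Int)) : Decidable (Spec_balanza elements out) := by unfold Spec_balanza; infer_instance

-- ===== CLAIM (what is proved, stated in full; the proofs are below) =====
def Claim_equal_balanza : Prop := ∀ (elements : List Int), Dom_balanza elements → Spec_balanza elements (balanza elements)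


-- ===== LEMMAS AND PROOFS =====

theorem pvFoldl_sum (l : List Int) : l.foldl (fun acc x => acc + x) 0 = l.sum := by
  simpa using PySem.List.foldl_add (fun x => x) (l := l) (a := 0)

theorem pvSum_take_succ (l : List Int) (n : Nat) (h : n < l.length) :
    (l.take (n + 1)).sum = (l.take n).sum + l[n] := by
  rw [List.take_add_one, List.getElem?_eq_getElem h, Option.toList_some, List.sum_append,
    List.sum_cons, List.sum_nil]; ring

theorem pvSum_split (l : List Int) (n : Nat) (h : n < l.length) :
    l.sum = (l.take n).sum + l[n] + (l.drop (n + 1)).sum := by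
  conv_lhs => rw [← List.take_append_drop n l, List.drop_eq_getElem_cons h]
  rw [List.sum_append, List.sum_cons]; ring

theorem pvSumSide_left (l : List Int) (m : Nat) :
    sumSide l 0 (m : Int) = (l.take m).sum := by
  unfold sumSide
  rw [PySem.List.slice_zero_start, PySem.List.slice_to_natCast, pvFoldl_sum]

theorem pvSumSide_right (l : List Int) (m : Nat) :
    sumSide l ((m : Int) + 1) (l.length : Int) = (l.drop (m + 1)).sum := by
  unfold sumSide
  rw [show ((m : Int) + 1) = ((m + 1 : Nat) : Int) by push_cast; ring,
    PySem.List.slice_natCast, List.take_of_length_le (by simp), pvFoldl_sum]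

-- loop invariant: B's fold carries A's (best_index, best_difference) plus the left prefix sum
theorem pvLoop (elements : List Int) (m : Nat) (h1 : 1 ≤ m) (hm : m ≤ elements.length - 1) :
    (PySem.List.pyRange 1 (m : Int) 1).foldl
      (fun (s : Int × Int × Int) i =>
        let left := s.2.2 + PySem.List.pyGetD elements (i - 1) 0
        let attempt := |left - (elements.sum - left - PySem.List.pyGetD elements i 0)|
        if s.2.1 = -1 ∨ attempt < s.2.1 then (i, attempt, left) else (s.1, s.2.1, left))
      (0, -1, 0)
    = (((PySem.List.pyRange 1 (m : Int) 1).foldl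
        (fun (s : Int × Int) i =>
          let attempt := |sumSide elements 0 i - sumSide elements (i + 1) (elements.length : Int)|
          if s.2 = -1 ∨ attempt < s.2 then (i, attempt) else s)
        (0, -1)).1,
       ((PySem.List.pyRange 1 (m : Int) 1).foldl
        (fun (s : Int × Int) i =>
          let attempt := |sumSide elements 0 i - sumSide elements (i + 1) (elements.length : Int)|
          if s.2 = -1 ∨ attempt < s.2 then (i, attempt) else s)
        (0, -1)).2,
       (elements.take (m - 1)).sum) := by
  induction m, h1 using Nat.le_induction with
  | base =>
      rw [PySem.List.pyRange_one_eq_nil (by omega)]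
      simp
  | succ m h1 ih =>
      have hm' : m ≤ elements.length - 1 := by omega
      have hml : m - 1 < elements.length := by omega
      have hmlt : m < elements.length := by omega
      have hr : PySem.List.pyRange 1 ((m + 1 : Nat) : Int) 1
          = PySem.List.pyRange 1 (m : Int) 1 ++ [(m : Int)] := by
        push_cast
        exact PySem.List.pyRange_one_succ_right (by exact_mod_cast h1)
      rw [hr, List.foldl_append, List.foldl_append, ih hm']
      simp only [List.foldl_cons, List.foldl_nil]
      have hg1 : PySem.List.pyGetD elements ((m : Int) - 1) 0 = elements[m - 1] := by
        rw [show ((m : Int) - 1) = ((m - 1 : Nat) : Int) by omega]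
        simp [List.getD_eq_getElem?_getD, List.getElem?_eq_getElem hml]
      have hg2 : PySem.List.pyGetD elements ((m : Int)) 0 = elements[m] := by
        simp [List.getD_eq_getElem?_getD, List.getElem?_eq_getElem hmlt]
      have hleft : (elements.take (m - 1)).sum + elements[m - 1] = (elements.take m).sum := by
        have h := pvSum_take_succ elements (m - 1) hml
        rw [show m - 1 + 1 = m by omega] at h
        linarith
      have hatt : (elements.take (m - 1)).sum + elements[m - 1]
            - (elements.sum - ((elements.take (m - 1)).sum + elements[m - 1]) - elements[m])
          = sumSide elements 0 (m : Int) - sumSide elements ((m : Int) + 1) (elements.length : Int) := by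
        rw [pvSumSide_left, pvSumSide_right]
        have h := pvSum_split elements m hmlt
        linarith
      rw [hg1, hg2, hatt, hleft]
      split_ifs <;> rfl

-- ===== VERDICT (by name: the statement is the Claim_ definition above) =====
theorem balanza_spec : Claim_equal_balanza := by
  intro elements _
  unfold Spec_balanza
  simp only [balanza, balanza_alt, pvFoldl_sum]
  by_cases h : elements.length ≤ 2
  · rw [PySem.List.pyRange_one_eq_nil (show ((elements.length : Int)) - 1 ≤ 1 by omega)]
    rfl
  · have hc : ((elements.length : Int)) - 1 = ((elements.length - 1 : Nat) : Int) := by omega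
    rw [hc, pvLoop elements (elements.length - 1) (by omega) (by omega)]
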